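-- pv_equiv track=rewrite | github.com/discopt/multilinear-instance-generators | random-image-restoration.py | generateCenter
-- ===== SOURCE A (Python) =====
-- def generateCenter(numRows, numColumns):
--   '''
--   border of size floor(w/4) and floor(h/4) around a centered block of 1s.
--   '''
--   image = [ [0] * numColumns for r in range(numRows) ]
--   left = numColumns // 4
--   top = numRows // 4
--   for r in range(numRows // 4, numRows - numRows // 4):
--     for c in range(numColumns // 4, numColumns - numColumns // 4):
--       image[r][c] = 1
--   return image
-- ===== SOURCE B (Python) =====
-- def generateCenter(numRows, numColumns):
--   top = numRows // 4
--   left = numColumns // 4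
--   mid = numColumns - 2 * left
--   return [([0] * left + [1] * mid + [0] * left) if top <= r < numRows - top else [0] * numColumns
--           for r in range(numRows)]
-- ===== Notes on version B (the rewrite author's own statement) =====
-- stated objective: simpler
-- what changed: B builds each row directly in one comprehension (border-block-border by concatenation, chosen per row index) instead of A's all-zeros grid followed by nested in-place element assignments.
import Mathlib
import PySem

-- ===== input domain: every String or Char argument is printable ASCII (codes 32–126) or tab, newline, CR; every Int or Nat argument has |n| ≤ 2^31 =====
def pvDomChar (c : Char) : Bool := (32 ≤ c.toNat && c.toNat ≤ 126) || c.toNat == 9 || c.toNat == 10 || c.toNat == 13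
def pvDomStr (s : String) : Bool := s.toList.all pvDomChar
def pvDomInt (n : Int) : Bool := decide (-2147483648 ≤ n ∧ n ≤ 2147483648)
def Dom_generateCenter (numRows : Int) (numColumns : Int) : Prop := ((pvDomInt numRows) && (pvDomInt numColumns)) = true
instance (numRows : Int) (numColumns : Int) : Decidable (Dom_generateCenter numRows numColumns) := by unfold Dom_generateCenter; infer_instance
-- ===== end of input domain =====

-- B builds each row directly (border ++ block ++ border, chosen per row index) instead of A's
-- all-zeros grid followed by nested in-place assignments; same cost, simpler decomposition.


-- ===== PORT A =====
-- 'image[r][c] = 1' is ported as modify/set with .toNat indices: exact for the nonnegative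
-- in-range indices the loops produce on every input Pre_ admits (A raises outside Pre_).
def generateCenter (numRows : Int) (numColumns : Int) : List (List Int) :=
  let image : List (List Int) :=
    (PySem.List.pyRange 0 numRows 1).map (fun _ => PySem.List.pyRepeat [(0 : Int)] numColumns)
  (PySem.List.pyRange (PySem.Int.floordiv numRows 4) (numRows - PySem.Int.floordiv numRows 4) 1).foldl
    (fun img r =>
      (PySem.List.pyRange (PySem.Int.floordiv numColumns 4) (numColumns - PySem.Int.floordiv numColumns 4) 1).foldl
        (fun img c => img.modify r.toNat (fun row => row.set c.toNat 1)) img)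
    image

-- ===== PORT B =====
def generateCenter_alt (numRows : Int) (numColumns : Int) : List (List Int) :=
  let top := PySem.Int.floordiv numRows 4
  let left := PySem.Int.floordiv numColumns 4
  let mid := numColumns - 2 * left
  (PySem.List.pyRange 0 numRows 1).map (fun r =>
    if top ≤ r ∧ r < numRows - top then
      PySem.List.pyRepeat [(0 : Int)] left ++ PySem.List.pyRepeat [(1 : Int)] mid
        ++ PySem.List.pyRepeat [(0 : Int)] left
    else
      PySem.List.pyRepeat [(0 : Int)] numColumns)

-- ===== PRECONDITION & SPEC =====
-- Pre_ excludes exactly the inputs on which A raises IndexError: numRows = -1 with a nonempty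
-- column loop, or numColumns = -1 with numRows ≥ 1 (the loop index -1 then indexes an
-- empty or too-short list).
def Pre_generateCenter (numRows : Int) (numColumns : Int) : Prop :=
  ¬ ((numRows = -1 ∧ (numColumns = -1 ∨ 1 ≤ numColumns)) ∨ (numColumns = -1 ∧ 1 ≤ numRows))
instance (numRows : Int) (numColumns : Int) : Decidable (Pre_generateCenter numRows numColumns) := by
  unfold Pre_generateCenter; infer_instance
def pvWitness_generateCenter : Int × Int := (6, 8)

def Spec_generateCenter (numRows : Int) (numColumns : Int) (out : List (List Int)) : Prop :=
  out = generateCenter_alt numRows numColumns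
instance (numRows : Int) (numColumns : Int) (out : List (List Int)) : Decidable (Spec_generateCenter numRows numColumns out) := by unfold Spec_generateCenter; infer_instance

-- ===== CLAIM (what is proved, stated in full; the proofs are below) =====
def Claim_equal_generateCenter : Prop := ∀ (numRows : Int) (numColumns : Int), Dom_generateCenter numRows numColumns → Pre_generateCenter numRows numColumns → Spec_generateCenter numRows numColumns (generateCenter numRows numColumns)

-- ===== LEMMAS AND PROOFS =====

-- Folding from [] over a state function that fixes [] stays [].
theorem pv_foldl_nil_fixed {β γ : Type} (F : List β → γ → List β) (h : ∀ x, F [] x = []) :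
    ∀ l : List γ, l.foldl F [] = [] := by
  intro l
  induction l with
  | nil => rfl
  | cons x xs ih => simp [List.foldl_cons, h, ih]

-- Folding 'modify at index r' over range(a, b) (a ≥ 0) applies g once to each position in [a, b).
theorem pv_foldl_modify_pyRange {α : Type} (g : α → α) :
    ∀ (n : Nat) (a b : Int) (xs : List α), 0 ≤ a → (b - a).toNat = n →
      (PySem.List.pyRange a b 1).foldl (fun ys r => ys.modify r.toNat g) xs
        = xs.mapIdx (fun i y => if a ≤ (i : Int) ∧ (i : Int) < b then g y else y) := by
  intro n
  induction n with
  | zero =>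
    intro a b xs ha hn
    rw [PySem.List.pyRange_one_eq_nil (by omega)]
    refine (List.foldl_nil).trans ?_
    refine (List.ext_getElem (by simp) ?_).symm
    intro i h1 h2
    simp only [List.getElem_mapIdx]
    have : ¬ (a ≤ (i : Int) ∧ (i : Int) < b) := by omega
    simp [this]
  | succ n ih =>
    intro a b xs ha hn
    have hab : a < b := by omega
    rw [PySem.List.pyRange_one_cons hab, List.foldl_cons]
    rw [ih (a + 1) b (xs.modify a.toNat g) (by omega) (by omega)]
    refine List.ext_getElem (by simp) ?_
    intro i h1 h2
    simp only [List.getElem_mapIdx]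
    by_cases hi : i = a.toNat
    · subst hi
      have hcast : ((a.toNat : Int)) = a := Int.toNat_of_nonneg ha
      have c1 : ¬ (a + 1 ≤ ((a.toNat : Int)) ∧ ((a.toNat : Int)) < b) := by omega
      have c2 : (a ≤ ((a.toNat : Int)) ∧ ((a.toNat : Int)) < b) := by omega
      rw [if_neg c1, if_pos c2, List.getElem_modify, if_pos rfl]
    · have hne : a.toNat ≠ i := fun h => hi h.symm
      rw [List.getElem_modify, if_neg hne]
      have hiff : (a + 1 ≤ (i : Int) ∧ (i : Int) < b) ↔ (a ≤ (i : Int) ∧ (i : Int) < b) := by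
        omega
      by_cases hc : a ≤ (i : Int) ∧ (i : Int) < b
      · rw [if_pos (hiff.mpr hc), if_pos hc]
      · rw [if_neg (fun h => hc (hiff.mp h)), if_neg hc]

-- Folding modifications at one fixed index collapses to a single modify with the folded function.
theorem pv_foldl_modify_fixed {α β : Type} (k : Nat) (f : α → β → α) :
    ∀ (cs : List β) (xs : List α),
      cs.foldl (fun ys c => ys.modify k (fun y => f y c)) xs
        = xs.modify k (fun y => cs.foldl f y) := by
  intro cs
  induction cs with
  | nil => intro xs; exact (List.modify_id k xs).symm
  | cons c cs ih =>
    intro xs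
    rw [List.foldl_cons, ih, List.modify_modify_eq]
    simp only [Function.comp_def, List.foldl_cons]

-- The inner column loop turns an all-zeros row of length C ≥ 0 into border ++ block ++ border.
theorem pv_inner_row (C : Int) (hC : 0 ≤ C) :
    (PySem.List.pyRange (PySem.Int.floordiv C 4) (C - PySem.Int.floordiv C 4) 1).foldl
      (fun row c => row.set c.toNat (1 : Int)) (PySem.List.pyRepeat [(0 : Int)] C)
    = PySem.List.pyRepeat [(0 : Int)] (PySem.Int.floordiv C 4)
        ++ PySem.List.pyRepeat [(1 : Int)] (C - 2 * PySem.Int.floordiv C 4)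
        ++ PySem.List.pyRepeat [(0 : Int)] (PySem.Int.floordiv C 4) := by
  have h4 : (0 : Int) < 4 := by omega
  rw [PySem.Int.floordiv_eq_ediv_of_pos h4]
  have hL0 : 0 ≤ C / 4 := by omega
  have hL1 : 2 * (C / 4) ≤ C := by omega
  have hfun : (fun (row : List Int) (c : Int) => row.set c.toNat (1 : Int))
      = (fun (row : List Int) (c : Int) => row.modify c.toNat (fun _ => (1 : Int))) := by
    funext row c; exact List.set_eq_modify 1 c.toNat row
  rw [hfun,
    pv_foldl_modify_pyRange (fun _ => (1 : Int)) ((C - C / 4) - C / 4).toNat (C / 4) (C - C / 4)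
      _ hL0 rfl]
  simp only [PySem.List.pyRepeat_singleton]
  refine List.ext_getElem (by simp; omega) ?_
  intro i h1 h2
  simp only [List.getElem_mapIdx, List.getElem_replicate]
  have hilen : i < C.toNat := by simpa using h1
  by_cases h5 : i < (C / 4).toNat
  · rw [List.getElem_append_left (by simp; omega), List.getElem_append_left (by simpa using h5),
      List.getElem_replicate, if_neg (by omega)]
  · by_cases h6 : i < (C / 4).toNat + (C - 2 * (C / 4)).toNat
    · rw [List.getElem_append_left (by simp; omega),
        List.getElem_append_right (by simpa using h5), List.getElem_replicate,
        if_pos (by constructor <;> omega)]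
    · rw [List.getElem_append_right (by simp; omega), List.getElem_replicate,
        if_neg (by omega)]

theorem generateCenter_eq (numRows numColumns : Int)
    (hpre : Pre_generateCenter numRows numColumns) :
    generateCenter numRows numColumns = generateCenter_alt numRows numColumns := by
  unfold Pre_generateCenter at hpre
  simp only [generateCenter, generateCenter_alt]
  by_cases hR : numRows ≤ 0
  · -- no rows: A's grid is [] and stays [], B maps over the empty range
    rw [PySem.List.pyRange_one_eq_nil hR, List.map_nil, List.map_nil]
    exact pv_foldl_nil_fixed
      (fun (img : List (List Int)) (r : Int) =>
        (PySem.List.pyRange (PySem.Int.floordiv numColumns 4)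
            (numColumns - PySem.Int.floordiv numColumns 4) 1).foldl
          (fun img c => img.modify r.toNat (fun row => row.set c.toNat 1)) img)
      (fun r => pv_foldl_nil_fixed
        (fun (img : List (List Int)) (c : Int) =>
          img.modify r.toNat (fun row => row.set c.toNat 1))
        (fun c => List.modify_nil ..) _) _
  · have hR1 : 1 ≤ numRows := by omega
    have h4 : (0 : Int) < 4 := by omega
    rw [PySem.Int.floordiv_eq_ediv_of_pos h4 (a := numRows)]
    have hT0 : 0 ≤ numRows / 4 := by omega
    have houter : (fun (img : List (List Int)) (r : Int) =>
        (PySem.List.pyRange (PySem.Int.floordiv numColumns 4)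
            (numColumns - PySem.Int.floordiv numColumns 4) 1).foldl
          (fun (img : List (List Int)) (c : Int) =>
            img.modify r.toNat (fun row => row.set c.toNat 1)) img)
        = (fun (img : List (List Int)) (r : Int) => img.modify r.toNat
            (fun row => (PySem.List.pyRange (PySem.Int.floordiv numColumns 4)
              (numColumns - PySem.Int.floordiv numColumns 4) 1).foldl
                (fun (row : List Int) (c : Int) => row.set c.toNat 1) row)) := by
      funext img r
      exact pv_foldl_modify_fixed r.toNat (fun (row : List Int) (c : Int) => row.set c.toNat 1) _ img
    rw [houter,
      pv_foldl_modify_pyRange _ ((numRows - numRows / 4) - numRows / 4).toNat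
        (numRows / 4) (numRows - numRows / 4) _ hT0 rfl]
    refine List.ext_getElem (by simp) ?_
    intro i h1 h2
    simp only [List.getElem_mapIdx, List.getElem_map, PySem.List.getElem_pyRange_one, zero_add]
    by_cases hc : numRows / 4 ≤ (i : Int) ∧ (i : Int) < numRows - numRows / 4
    · rw [if_pos hc, if_pos hc]
      by_cases hC : 0 ≤ numColumns
      · exact pv_inner_row numColumns hC
      · -- numColumns ≤ -2 here (-1 is excluded by Pre_): every range/repeat is empty
        have hC2 : numColumns ≤ -2 := by
          by_contra h
          exact hpre (Or.inr ⟨by omega, hR1⟩)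
        rw [PySem.Int.floordiv_eq_ediv_of_pos h4 (a := numColumns)]
        have hle : numColumns - numColumns / 4 ≤ numColumns / 4 := by omega
        rw [PySem.List.pyRange_one_eq_nil hle, List.foldl_nil]
        simp only [PySem.List.pyRepeat_singleton]
        have e1 : numColumns.toNat = 0 := by omega
        have e2 : (numColumns / 4).toNat = 0 := by omega
        have e3 : (numColumns - 2 * (numColumns / 4)).toNat = 0 := by omega
        simp [e1, e2, e3]
    · rw [if_neg hc, if_neg hc]

-- ===== VERDICT (by name: the statement is the Claim_ definition above) =====
theorem generateCenter_spec : Claim_equal_generateCenter := by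
  intro numRows numColumns _ hpre
  exact generateCenter_eq numRows numColumns hpre
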